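-- pv_equiv track=rewrite | github.com/thedavidchu/online_mrc | script/mattson.py | mattson
-- ===== SOURCE A (Python) =====
-- from typing import Dict, List, Set, Tuple
--
-- def find_previous_occurrence(
--     trace: List[int], current_index: int, current_element: int,
-- ) -> int:
--     """
--     @brief  Find the index of the previous occurrence.
--     """
--     reversed_prev_index = list(reversed(trace[:current_index])).index(current_element)
--     return current_index - reversed_prev_index - 1
--
-- def get_reuse_distance_for_seen_element(
--         trace: List[int], current_index: int, current_element: int,
-- ) -> int:
--     """
--     @brief  Get the reuse distance for an element that has been seen already.
--             Otherwise, it will throw an error!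
--     """
--     previous_access = find_previous_occurrence(trace, current_index, current_element)
--     unique_elements = set(trace[previous_access:current_index])
--     # NOTE  By convention, if an element is accessed twice in a row, I could the
--     #       stack distance to be zero, not one. This doesn't actually make sense
--     #       but oh well. This is sort of an off-by-one bias.
--     return len(unique_elements) - 1
--
-- def sort_dict_by_key(my_dict: Dict) -> Dict:
--     return dict(sorted(my_dict.items()))
--
-- def mattson(trace: List[int]) -> Tuple[Dict[int, int], int]:
--     seen_elements: Set[int] = set()
--     histogram: Dict[int, int] = {}
--     infinite_stack_distances: int = 0
--     for i, e in enumerate(trace):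
--         if e not in seen_elements:
--             seen_elements.add(e)
--             infinite_stack_distances += 1
--             continue
--         reuse_distance = get_reuse_distance_for_seen_element(trace, i, e)
--         histogram[reuse_distance] = histogram.get(reuse_distance, 0) + 1
--     # Sort the histogram dict so that it is easier to manually compare for equality
--     histogram = sort_dict_by_key(histogram)
--     return histogram, infinite_stack_distances
-- ===== SOURCE B (Python) =====
-- from typing import Dict, List, Tuple
--
-- def mattson(trace: List[int]) -> Tuple[Dict[int, int], int]:
--     # One pass keeping each value's last-access index; the reuse distance of a
--     # repeated access is the number of tracked last-access indices beyond the
--     # previous access of this value.  No slicing / per-access set building.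
--     last: Dict[int, int] = {}
--     histogram: Dict[int, int] = {}
--     infinite_stack_distances = 0
--     for i, e in enumerate(trace):
--         prev = last.get(e)
--         if prev is None:
--             infinite_stack_distances += 1
--         else:
--             reuse_distance = sum(1 for q in last.values() if q > prev)
--             histogram[reuse_distance] = histogram.get(reuse_distance, 0) + 1
--         last[e] = i
--     return dict(sorted(histogram.items())), infinite_stack_distances
-- ===== Notes on version B (the rewrite author's own statement) =====
-- stated objective: faster
-- what changed: Replaces A's per-repeated-access work (slice the trace prefix, reverse it, linear .index scan, and build a fresh set of the whole reuse window) with a single pass that keeps one dictionary of last-access indices; the reuse distance is the count of tracked last-access indices beyond the previous access, so no trace slicing or per-access set construction remains.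
import Mathlib
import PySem

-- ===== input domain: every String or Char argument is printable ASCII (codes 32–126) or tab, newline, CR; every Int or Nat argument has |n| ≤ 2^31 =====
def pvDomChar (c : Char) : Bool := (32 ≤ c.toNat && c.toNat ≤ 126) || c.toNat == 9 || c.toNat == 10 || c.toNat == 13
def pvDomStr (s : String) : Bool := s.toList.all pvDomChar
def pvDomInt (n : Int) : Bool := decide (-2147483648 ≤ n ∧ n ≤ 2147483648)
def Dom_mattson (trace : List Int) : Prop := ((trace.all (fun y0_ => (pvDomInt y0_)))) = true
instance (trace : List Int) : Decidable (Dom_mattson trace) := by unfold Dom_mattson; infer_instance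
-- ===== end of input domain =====

-- B replaces A's per-access slice/reverse/set-building with one pass over a last-access-index
-- dictionary (reuse distance = number of tracked last-access indices beyond the previous access).

-- ===== PORT A =====
-- find_previous_occurrence: list(reversed(trace[:i])).index(e); none = ValueError (never hit inside mattson)
def findPreviousOccurrence (trace : List Int) (currentIndex : Int) (currentElement : Int) :
    Option Int :=
  (PySem.List.index? (PySem.List.slice trace none (some currentIndex)).reverse
      currentElement).map (fun (r : Nat) => currentIndex - (r : Int) - 1)

-- get_reuse_distance_for_seen_element: len(set(trace[prev:i])) - 1
def getReuseDistanceForSeenElement (trace : List Int) (currentIndex : Int) (currentElement : Int) :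
    Option Int :=
  (findPreviousOccurrence trace currentIndex currentElement).map (fun previousAccess =>
    ((PySem.Set.ofList (PySem.List.slice trace (some previousAccess) (some currentIndex))).length
      : Int) - 1)

-- sort_dict_by_key: dict(sorted(my_dict.items()))
def sortDictByKey (d : PySem.Dict Int Int) : PySem.Dict Int Int :=
  PySem.Dict.ofList (PySem.List.sorted2 d.items (fun p => p.1) (fun p => p.2) false)

def mattson (trace : List Int) : (List (Int × Int)) × Int :=
  let final := (PySem.List.enumerate trace 0).foldl
    (fun (s : PySem.Set Int × PySem.Dict Int Int × Int) ie =>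
      if !(PySem.Set.contains s.1 ie.2) then
        (PySem.Set.add s.1 ie.2, s.2.1, s.2.2 + 1)
      else
        match getReuseDistanceForSeenElement trace ie.1 ie.2 with
        | some rd => (s.1, s.2.1.insert rd (s.2.1.getD rd 0 + 1), s.2.2)
        | none => (s.1, s.2.1, s.2.2))   -- unreachable (element was seen): totalization only
    (PySem.Set.empty, PySem.Dict.empty, 0)
  ((sortDictByKey final.2.1).items, final.2.2)

-- ===== PORT B =====
def mattson_alt (trace : List Int) : (List (Int × Int)) × Int :=
  let final := (PySem.List.enumerate trace 0).foldl
    (fun (s : PySem.Dict Int Int × PySem.Dict Int Int × Int) ie =>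
      match s.1.get? ie.2 with
      | none => (s.1.insert ie.2 ie.1, s.2.1, s.2.2 + 1)
      | some prev =>
          let rd : Int := (s.1.values.countP (fun q => decide (prev < q)) : Int)
          (s.1.insert ie.2 ie.1, s.2.1.insert rd (s.2.1.getD rd 0 + 1), s.2.2))
    (PySem.Dict.empty, PySem.Dict.empty, 0)
  (PySem.List.sorted2 final.2.1.items (fun p => p.1) (fun p => p.2) false, final.2.2)

-- ===== PRECONDITION & SPEC =====
def Spec_mattson (trace : List Int) (out : (List (Int × Int)) × Int) : Prop := out = mattson_alt trace
instance (trace : List Int) (out : (List (Int × Int)) × Int) : Decidable (Spec_mattson trace out) := by unfold Spec_mattson; infer_instance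

-- ===== CLAIM (what is proved, stated in full; the proofs are below) =====
def Claim_equal_mattson : Prop := ∀ (trace : List Int), Dom_mattson trace → Spec_mattson trace (mattson trace)

-- ===== LEMMAS AND PROOFS =====
-- stepA / stepB: the fold bodies of the two ports, named for the invariant proof
def stepA (trace : List Int) (s : PySem.Set Int × PySem.Dict Int Int × Int) (ie : Int × Int) :
    PySem.Set Int × PySem.Dict Int Int × Int :=
  if !(PySem.Set.contains s.1 ie.2) then
    (PySem.Set.add s.1 ie.2, s.2.1, s.2.2 + 1)
  else
    match getReuseDistanceForSeenElement trace ie.1 ie.2 with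
    | some rd => (s.1, s.2.1.insert rd (s.2.1.getD rd 0 + 1), s.2.2)
    | none => (s.1, s.2.1, s.2.2)

def stepB (s : PySem.Dict Int Int × PySem.Dict Int Int × Int) (ie : Int × Int) :
    PySem.Dict Int Int × PySem.Dict Int Int × Int :=
  match s.1.get? ie.2 with
  | none => (s.1.insert ie.2 ie.1, s.2.1, s.2.2 + 1)
  | some prev =>
      let rd : Int := (s.1.values.countP (fun q => decide (prev < q)) : Int)
      (s.1.insert ie.2 ie.1, s.2.1.insert rd (s.2.1.getD rd 0 + 1), s.2.2)

def lastD (p : List Int) : PySem.Dict Int Int :=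
  (PySem.List.enumerate p 0).foldl (fun d q => d.insert q.2 q.1) PySem.Dict.empty

theorem lastD_append (l : List Int) (x : Int) :
    lastD (l ++ [x]) = (lastD l).insert x (l.length : Int) := by
  unfold lastD
  rw [PySem.List.enumerate_append, List.foldl_append]
  simp [PySem.List.enumerate]

theorem keys_lastD (l : List Int) : (lastD l).keys = PySem.List.dedup l := by
  unfold lastD
  rw [PySem.Dict.keys_foldl_insert_key (PySem.List.enumerate l 0) (fun q => q.2) (fun d q => q.1)
      PySem.Dict.empty]
  rw [PySem.List.map_snd_enumerate, PySem.List.dedup_eq_ofList]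
  simp [PySem.Dict.keys_empty]
  rfl

theorem nodup_keys_lastD (l : List Int) : (lastD l).keys.Nodup := by
  rw [keys_lastD]; exact PySem.List.nodup_dedup l

theorem get?_lastD_none (l : List Int) (k : Int) (h : k ∉ l) : (lastD l).get? k = none := by
  rw [PySem.Dict.get?_eq_none_iff_not_mem_keys, keys_lastD]
  simpa [PySem.List.mem_dedup] using h

theorem get?_lastD_mem (l : List Int) (k : Int) (h : k ∈ l) :
    ∃ j : Nat, (lastD l).get? k = some (j : Int) ∧ j < l.length ∧ l[j]? = some k ∧
      k ∉ l.drop (j + 1) := by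
  induction l using List.reverseRecOn with
  | nil => simp at h
  | append_singleton l x ih =>
    rw [lastD_append]
    by_cases hkx : k = x
    · subst hkx
      refine ⟨l.length, ?_, by simp, by simp, by simp⟩
      rw [PySem.Dict.get?_insert_self]
    · have hkl : k ∈ l := by
        rcases List.mem_append.mp h with h' | h'
        · exact h'
        · simp at h'; exact absurd h' hkx
      obtain ⟨j, hget, hj, hgetj, hdrop⟩ := ih hkl
      refine ⟨j, ?_, by simp; omega, ?_, ?_⟩
      · rw [PySem.Dict.get?_insert_of_ne (hne := hkx)]; exact hget
      · rw [List.getElem?_append_left hj]; exact hgetj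
      · rw [List.drop_append_of_le_length (by omega)]
        simp [hdrop, hkx]

theorem exists_last_split (p : List Int) (e : Int) (h : e ∈ p) :
    ∃ a b, p = a ++ e :: b ∧ e ∉ b := by
  induction p using List.reverseRecOn with
  | nil => simp at h
  | append_singleton l x ih =>
    by_cases hex : e = x
    · exact ⟨l, [], by simp [hex], by simp⟩
    · have hel : e ∈ l := by
        rcases List.mem_append.mp h with h' | h'
        · exact h'
        · simp at h'; exact absurd h' hex
      obtain ⟨a, b, hab, hb⟩ := ih hel
      exact ⟨a, b ++ [x], by simp [hab], by simp [hb, hex]⟩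

theorem get?_lastD_split (a b : List Int) (e : Int) (hb : e ∉ b) :
    (lastD (a ++ e :: b)).get? e = some (a.length : Int) := by
  have hmem : e ∈ a ++ e :: b := by simp
  obtain ⟨j, hget, hj, hgetj, hdrop⟩ := get?_lastD_mem _ _ hmem
  have hja : j = a.length := by
    rcases lt_trichotomy j a.length with hlt | heq | hgt
    · exfalso
      apply hdrop
      have hE : (a ++ e :: b)[a.length]? = some e := by
        rw [List.getElem?_append_right (le_refl _)]; simp
      have hD : ((a ++ e :: b).drop (j+1))[a.length - (j+1)]? = some e := by
        rw [List.getElem?_drop, show j + 1 + (a.length - (j+1)) = a.length by omega]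
        exact hE
      exact List.mem_of_getElem? hD
    · exact heq
    · exfalso
      have hE : (a ++ e :: b)[j]? = b[j - a.length - 1]? := by
        rw [List.getElem?_append_right (by omega)]
        rw [show j - a.length = (j - a.length - 1) + 1 by omega]
        simp
      rw [hE] at hgetj
      exact hb (List.mem_of_getElem? hgetj)
  rw [hja] at hget; exact hget

theorem mem_b_iff (a b : List Int) (e k : Int) (_hb : e ∉ b) (_hk : k ∈ a ++ e :: b)
    (j : Nat) (_hj : j < (a ++ e :: b).length) (hgetj : (a ++ e :: b)[j]? = some k)
    (hdrop : k ∉ (a ++ e :: b).drop (j + 1)) :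
    (a.length < j ↔ k ∈ b) := by
  constructor
  · intro hgt
    have hE : (a ++ e :: b)[j]? = b[j - a.length - 1]? := by
      rw [List.getElem?_append_right (by omega)]
      rw [show j - a.length = (j - a.length - 1) + 1 by omega]
      simp
    rw [hE] at hgetj
    exact List.mem_of_getElem? hgetj
  · intro hkb
    by_contra hle
    rw [not_lt] at hle
    apply hdrop
    have hbdrop : (a ++ e :: b).drop (a.length + 1) = b := by
      rw [List.drop_append]; simp
    have : (a ++ e :: b).drop (a.length + 1) =
        ((a ++ e :: b).drop (j + 1)).drop (a.length - j) := by
      rw [List.drop_drop]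
      congr 1
      omega
    rw [this] at hbdrop
    rw [← hbdrop] at hkb
    exact List.mem_of_mem_drop hkb

theorem countP_lastD (a b : List Int) (e : Int) (hb : e ∉ b) :
    (lastD (a ++ e :: b)).values.countP (fun q => decide ((a.length : Int) < q)) =
      (PySem.List.dedup b).length := by
  set p := a ++ e :: b with hp
  rw [PySem.Dict.values_eq_map_keys _ (nodup_keys_lastD p) 0, List.countP_map, keys_lastD]
  have hcongr : ∀ k ∈ PySem.List.dedup p,
      ((fun q => decide ((a.length : Int) < q)) ∘ (fun k => (lastD p).getD k 0)) k =
        decide (k ∈ b) := by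
    intro k hkd
    have hk : k ∈ p := (PySem.List.mem_dedup p k).mp hkd
    obtain ⟨j, hget, hj, hgetj, hdrop⟩ := get?_lastD_mem p k hk
    have hgd : (lastD p).getD k 0 = (j : Int) :=
      PySem.Dict.getD_of_get?_eq_some _ 0 hget
    have hiff := mem_b_iff a b e k hb (by rwa [← hp]) j hj hgetj hdrop
    simp only [Function.comp, hgd]
    rw [decide_eq_decide]
    constructor
    · intro h; exact hiff.mp (by exact_mod_cast h)
    · intro h; exact_mod_cast hiff.mpr h
  rw [List.countP_congr (fun x hx => by rw [hcongr x hx])]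
  rw [List.countP_eq_length_filter]
  have hnd1 : (List.filter (fun k => decide (k ∈ b)) (PySem.List.dedup p)).Nodup :=
      (PySem.List.nodup_dedup p).filter _
  have hnd2 := PySem.List.nodup_dedup b
  have hperm : (List.filter (fun k => decide (k ∈ b)) (PySem.List.dedup p)).Perm
      (PySem.List.dedup b) := by
    rw [List.perm_ext_iff_of_nodup hnd1 hnd2]
    intro x
    simp only [List.mem_filter, PySem.List.mem_dedup, decide_eq_true_eq]
    constructor
    · rintro ⟨-, hxb⟩; exact hxb
    · intro hxb
      exact ⟨by rw [hp]; exact List.mem_append.mpr (Or.inr (List.mem_cons_of_mem _ hxb)), hxb⟩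
  exact hperm.length_eq

theorem length_ofList_cons_not_mem (e : Int) (b : List Int) (hb : e ∉ b) :
    (PySem.Set.ofList (e :: b)).length = (PySem.List.dedup b).length + 1 := by
  have hnd1 := PySem.Set.nodup_ofList (e :: b)
  have hnd2 : (e :: PySem.List.dedup b).Nodup := by
    refine List.nodup_cons.mpr ⟨?_, PySem.List.nodup_dedup b⟩
    simpa [PySem.List.mem_dedup] using hb
  have hperm : (PySem.Set.ofList (e :: b)).Perm (e :: PySem.List.dedup b) := by
    rw [List.perm_ext_iff_of_nodup hnd1 hnd2]
    intro x
    simp [PySem.Set.mem_ofList]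
  simpa using hperm.length_eq

theorem getReuse_split (trace : List Int) (n : Nat) (hn : n ≤ trace.length) (a b : List Int)
    (e : Int) (hsplit : trace.take n = a ++ e :: b) (hb : e ∉ b) :
    getReuseDistanceForSeenElement trace (n : Int) e =
      some (((PySem.List.dedup b).length : Int)) := by
  have hlen : n = a.length + 1 + b.length := by
    have := congrArg List.length hsplit
    simp [List.length_take] at this
    omega
  have hfind : findPreviousOccurrence trace (n : Int) e = some (a.length : Int) := by
    unfold findPreviousOccurrence
    rw [PySem.List.slice_to_natCast, hsplit]
    have hidx : PySem.List.index? (a ++ e :: b).reverse e = some b.length := by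
      rw [PySem.List.index?_eq_some_iff]
      exact ⟨b.reverse, a.reverse, by simp, by simp, by simpa using hb⟩
    rw [hidx]
    rw [Option.map_some]
    congr 1
    omega
  unfold getReuseDistanceForSeenElement
  rw [hfind]
  simp only [Option.map_some]
  congr 1
  have hslice : PySem.List.slice trace (some (a.length : Int)) (some (n : Int)) = e :: b := by
    rw [PySem.List.slice_natCast, ← List.drop_take, hsplit, List.drop_append]
    simp
  rw [hslice, length_ofList_cons_not_mem e b hb]
  push_cast
  ring

theorem ofList_append_singleton (p : List Int) (e : Int) :
    PySem.Set.ofList (p ++ [e]) = PySem.Set.add (PySem.Set.ofList p) e := by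
  rw [PySem.Set.ofList_eq_foldl, List.foldl_append, ← PySem.Set.ofList_eq_foldl]
  rfl

theorem loop_inv (trace : List Int) (n : Nat) (hn : n ≤ trace.length) :
    (((PySem.List.enumerate trace 0).take n).foldl (stepA trace)
        (PySem.Set.empty, PySem.Dict.empty, 0)).1 = PySem.Set.ofList (trace.take n) ∧
    (((PySem.List.enumerate trace 0).take n).foldl stepB
        (PySem.Dict.empty, PySem.Dict.empty, 0)).1 = lastD (trace.take n) ∧
    (((PySem.List.enumerate trace 0).take n).foldl (stepA trace)
        (PySem.Set.empty, PySem.Dict.empty, 0)).2.1 =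
      (((PySem.List.enumerate trace 0).take n).foldl stepB
        (PySem.Dict.empty, PySem.Dict.empty, 0)).2.1 ∧
    (((PySem.List.enumerate trace 0).take n).foldl (stepA trace)
        (PySem.Set.empty, PySem.Dict.empty, 0)).2.2 =
      (((PySem.List.enumerate trace 0).take n).foldl stepB
        (PySem.Dict.empty, PySem.Dict.empty, 0)).2.2 ∧
    (((PySem.List.enumerate trace 0).take n).foldl (stepA trace)
        (PySem.Set.empty, PySem.Dict.empty, 0)).2.1.keys.Nodup := by
  induction n with
  | zero =>
    refine ⟨rfl, rfl, rfl, rfl, ?_⟩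
    exact PySem.Dict.nodup_keys_empty
  | succ n ih =>
    have hn' : n ≤ trace.length := by omega
    obtain ⟨A1, B1, H, I, N⟩ := ih hn'
    have hnlt : n < trace.length := by omega
    have hEtake : (PySem.List.enumerate trace 0).take (n + 1) =
        (PySem.List.enumerate trace 0).take n ++ [Prod.mk (n : Int) («trace»[n]'hnlt)] := by
      rw [List.take_add_one, PySem.List.getElem?_enumerate]
      rw [List.getElem?_eq_getElem hnlt]
      simp
    have hptake : trace.take (n + 1) = trace.take n ++ [«trace»[n]] := by
      rw [List.take_add_one, List.getElem?_eq_getElem hnlt]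
      rfl
    have hplen : (trace.take n).length = n := by simp [List.length_take]; omega
    set p := trace.take n with hp
    set e := «trace»[n] with he
    rw [hEtake, hptake]
    rw [List.foldl_append, List.foldl_append]
    set sA := ((PySem.List.enumerate trace 0).take n).foldl (stepA trace)
      (PySem.Set.empty, PySem.Dict.empty, 0) with hsA
    set sB := ((PySem.List.enumerate trace 0).take n).foldl stepB
      (PySem.Dict.empty, PySem.Dict.empty, 0) with hsB
    simp only [List.foldl_cons, List.foldl_nil]
    by_cases hmem : e ∈ p
    · -- seen element
      have hcont : PySem.Set.contains sA.1 e = true := by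
        rw [A1]; simp [PySem.Set.contains]; exact hmem
      obtain ⟨a, b, hsplit, hb⟩ := exists_last_split p e hmem
      have hgetr := getReuse_split trace n hn' a b e (hsplit ▸ hp ▸ rfl) hb
      have hgetB : sB.1.get? e = some (a.length : Int) := by
        rw [B1, hp, hsplit] at *
        exact get?_lastD_split a b e hb
      have hcount : sB.1.values.countP (fun q => decide ((a.length : Int) < q)) =
          (PySem.List.dedup b).length := by
        rw [B1, hp, hsplit] at *
        exact countP_lastD a b e hb
      have hA : stepA trace sA (↑n, e) =
          (sA.1, sA.2.1.insert ((PySem.List.dedup b).length : Int)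
            (sA.2.1.getD ((PySem.List.dedup b).length : Int) 0 + 1), sA.2.2) := by
        unfold stepA
        rw [hcont]
        simp only [Bool.not_true, Bool.false_eq_true, if_false]
        rw [hgetr]
      have hB : stepB sB (↑n, e) =
          (sB.1.insert e (n : Int), sB.2.1.insert ((PySem.List.dedup b).length : Int)
            (sB.2.1.getD ((PySem.List.dedup b).length : Int) 0 + 1), sB.2.2) := by
        unfold stepB
        rw [hgetB]
        simp only [hcount]
      rw [hA, hB]
      refine ⟨?_, ?_, by simp [H], by simp [I], ?_⟩
      · -- set unchanged
        rw [ofList_append_singleton, A1]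
        unfold PySem.Set.add
        have : PySem.Set.contains (PySem.Set.ofList p) e = true := by
          simp [PySem.Set.contains]; exact hmem
        rw [this]
        simp
      · -- lastD update
        rw [lastD_append, B1, hplen]
      · exact PySem.Dict.nodup_keys_insert _ _ _ N
    · -- new element
      have hcont : PySem.Set.contains sA.1 e = false := by
        rw [A1]; simp [PySem.Set.contains]
        intro h
        exact absurd ((PySem.Set.mem_ofList p e).mp (by simpa using h)) hmem
      have hgetB : sB.1.get? e = none := by
        rw [B1]; exact get?_lastD_none p e hmem
      have hA : stepA trace sA (↑n, e) = (PySem.Set.add sA.1 e, sA.2.1, sA.2.2 + 1) := by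
        unfold stepA
        rw [hcont]
        simp
      have hB : stepB sB (↑n, e) = (sB.1.insert e (n : Int), sB.2.1, sB.2.2 + 1) := by
        unfold stepB
        rw [hgetB]
      rw [hA, hB]
      refine ⟨?_, ?_, by simp [H], by simp [I], by simpa using N⟩
      · rw [ofList_append_singleton, A1]
      · rw [lastD_append, B1, hplen]

theorem items_ofList_of_nodup_keys (l : List (Int × Int)) (h : (l.map (·.1)).Nodup) :
    (PySem.Dict.ofList l).items = l := by
  show (List.foldl (fun acc p => acc.insert p.1 p.2) PySem.Dict.empty l).items = l
  rw [PySem.Dict.items_foldl_insert_fresh l (fun p => p.1) (fun p => p.2) PySem.Dict.empty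
      (fun a _ => PySem.Dict.contains_empty _) h]
  simp [PySem.Dict.empty]

theorem mattson_eq (trace : List Int) : mattson trace = mattson_alt trace := by
  have hlenE : (PySem.List.enumerate trace 0).length = trace.length :=
    PySem.List.length_enumerate trace 0
  have htakeE : (PySem.List.enumerate trace 0).take trace.length =
      PySem.List.enumerate trace 0 := by
    rw [← hlenE]; exact List.take_length
  obtain ⟨A1, B1, H, I, N⟩ := loop_inv trace trace.length (le_refl _)
  rw [htakeE] at A1 B1 H I N
  show ((sortDictByKey ((PySem.List.enumerate trace 0).foldl (stepA trace)
      (PySem.Set.empty, PySem.Dict.empty, 0)).2.1).items,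
    ((PySem.List.enumerate trace 0).foldl (stepA trace)
      (PySem.Set.empty, PySem.Dict.empty, 0)).2.2) =
    (PySem.List.sorted2 ((PySem.List.enumerate trace 0).foldl stepB
        (PySem.Dict.empty, PySem.Dict.empty, 0)).2.1.items (fun p => p.1) (fun p => p.2) false,
      ((PySem.List.enumerate trace 0).foldl stepB
        (PySem.Dict.empty, PySem.Dict.empty, 0)).2.2)
  rw [H, I]
  congr 1
  unfold sortDictByKey
  apply items_ofList_of_nodup_keys
  have hp := PySem.List.sorted2_perm (((PySem.List.enumerate trace 0).foldl stepB
    (PySem.Dict.empty, PySem.Dict.empty, 0)).2.1.items) (fun p => p.1) (fun p => p.2) false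
  have hmap := hp.map (fun p : Int × Int => p.1)
  rw [hmap.nodup_iff]
  rw [H] at N
  exact N

-- ===== VERDICT (by name: the statement is the Claim_ definition above) =====
theorem mattson_spec : Claim_equal_mattson := by
  intro trace _
  show mattson trace = mattson_alt trace
  exact mattson_eq trace
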